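-- pv_equiv track=rewrite | github.com/Egon2k/aoc2024 | day07/solution.py | part1
-- ===== SOURCE A (Python) =====
-- from itertools import product
--
-- operations = ['+','*']
--
-- def calculate_combinations(numbers, operators):
--     num_operators = len(numbers) - 1  # Number of operators needed is one less than the number of numbers
--     operator_combinations = list(product(operators, repeat=num_operators))  # All combinations of operators
--
--     results = []
--     for operator_set in operator_combinations:
--         # Build the expression as a string
--         expression = [int(numbers[0])]
--         for num, op in zip(numbers[1:], operator_set):
--             expression.append(op)
--             expression.append(int(num))
--         results.append(expression)
--     return results
--
-- def part1(data):
--     sum = 0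
--     for eq in data:
--         formulas = calculate_combinations(eq[1], operations)
--         for formula in formulas:
--             res = 0
--             next_op = "+"
--             for element in formula:
--                 if element in operations:
--                     next_op = element
--                     continue
--                 if next_op == "+":
--                     res += element
--                 if next_op == "*":
--                     res *= element
--             if int(eq[0]) == res:
--                 sum += int(eq[0])
--                 break
--     return sum
-- ===== SOURCE B (Python) =====
-- def part1(data):
--     total = 0
--     for target, numbers in data:
--         vals = {numbers[0]}
--         for n in numbers[1:]:
--             vals = {v + n for v in vals} | {v * n for v in vals}
--         if target in vals:
--             total += target
--     return total
-- ===== Notes on version B (the rewrite author's own statement) =====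
-- stated objective: faster
-- what changed: Replaced A's enumeration of all 2^(n-1) operator tuples (each evaluated via a built expression list) by a single forward pass maintaining the deduplicated set of reachable values.
-- outside the precondition, e.g. on part1([(5, [])]): A raises ValueError, B raises IndexError
import Mathlib
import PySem

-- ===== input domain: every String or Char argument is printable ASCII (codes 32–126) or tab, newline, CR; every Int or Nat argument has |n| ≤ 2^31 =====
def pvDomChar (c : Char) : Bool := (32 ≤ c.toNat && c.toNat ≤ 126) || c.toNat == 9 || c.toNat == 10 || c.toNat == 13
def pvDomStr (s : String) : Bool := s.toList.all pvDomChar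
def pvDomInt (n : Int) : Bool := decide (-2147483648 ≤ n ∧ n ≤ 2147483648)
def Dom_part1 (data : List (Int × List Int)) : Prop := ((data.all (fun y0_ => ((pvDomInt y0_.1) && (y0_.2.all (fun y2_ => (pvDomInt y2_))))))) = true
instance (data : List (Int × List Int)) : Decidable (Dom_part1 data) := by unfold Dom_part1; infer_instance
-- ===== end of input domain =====

-- B replaces A's enumeration of all 2^(n-1) operator tuples by a forward pass over the
-- deduplicated set of reachable values (objective: faster, asymptotic per equation).

-- ===== PORT A =====
-- element of the mixed Python list [int, '+', int, '*', ...] built by calculate_combinations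
inductive PyElem where
  | num : Int → PyElem
  | op : String → PyElem
deriving DecidableEq, Repr

def pvOperations : List String := ["+", "*"]

-- list(product(operators, repeat=k))  (itertools order: first slot varies slowest)
def pvProduct (operators : List String) : Nat → List (List String)
  | 0 => [[]]
  | k+1 => operators.flatMap (fun o => (pvProduct operators k).map (fun rest => o :: rest))

-- calculate_combinations(numbers, operators); on numbers = [] Python raises (excluded by Pre_part1)
def calculate_combinations (numbers : List Int) (operators : List String) : List (List PyElem) :=
  match numbers with
  | [] => []
  | n0 :: rest =>
    (pvProduct operators rest.length).map (fun opset =>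
      (rest.zip opset).foldl
        (fun expr p => expr ++ [PyElem.op p.2, PyElem.num p.1]) [PyElem.num n0])

-- one step of A's inner evaluation loop; 'element in operations' is always true for the
-- .op elements calculate_combinations builds, so the op branch sets next_op unconditionally
def pvEvalStep (st : Int × String) (e : PyElem) : Int × String :=
  match e with
  | .op o => (st.1, o)
  | .num n =>
    let r := if st.2 = "+" then st.1 + n else st.1
    let r := if st.2 = "*" then r * n else r
    (r, st.2)

-- 'for formula in formulas: … if int(eq[0]) == res: sum += int(eq[0]); break'
def pvInner (target : Int) (s : Int) : List (List PyElem) → Int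
  | [] => s
  | f :: rest =>
    let res := (f.foldl pvEvalStep (0, "+")).1
    if target = res then s + target else pvInner target s rest

def part1 (data : List (Int × List Int)) : Int :=
  data.foldl (fun s eq => pvInner eq.1 s (calculate_combinations eq.2 pvOperations)) 0

-- ===== PORT B =====
-- vals = {v+n for v in vals} | {v*n for v in vals}, folded over numbers[1:]
def pvReach (vals : PySem.Set Int) : List Int → PySem.Set Int
  | [] => vals
  | n :: t =>
      pvReach (PySem.Set.union (PySem.Set.ofList (vals.map (· + n))) (vals.map (· * n))) t

def part1_alt (data : List (Int × List Int)) : Int :=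
  data.foldl (fun tot eq =>
    match eq.2 with
    | [] => tot   -- Python B raises IndexError here (excluded by Pre_part1)
    | a :: t => if eq.1 ∈ pvReach (PySem.Set.ofList [a]) t then tot + eq.1 else tot) 0

-- ===== PRECONDITION & SPEC =====
-- Pre_ excludes equations with an empty number list: there A raises ValueError
-- (product(…, repeat=-1)) and B raises IndexError (numbers[0]).
def Pre_part1 (data : List (Int × List Int)) : Prop := ∀ p ∈ data, p.2 ≠ []
instance (data : List (Int × List Int)) : Decidable (Pre_part1 data) := by
  unfold Pre_part1; infer_instance

def pvWitness_part1 : (List (Int × List Int)) := [(6, [2, 3]), (10, [2, 3, 4])]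

def Spec_part1 (data : List (Int × List Int)) (out : Int) : Prop := out = part1_alt data
instance (data : List (Int × List Int)) (out : Int) : Decidable (Spec_part1 data out) := by unfold Spec_part1; infer_instance

-- ===== CLAIM (what is proved, stated in full; the proofs are below) =====
def Claim_equal_part1 : Prop := ∀ (data : List (Int × List Int)), Dom_part1 data → Pre_part1 data → Spec_part1 data (part1 data)

-- ===== LEMMAS AND PROOFS =====

-- left-to-right application of one operator, as A's eval loop performs it
def pvApply (a n : Int) (o : String) : Int :=
  if o = "+" then a + n else if o = "*" then a * n else a

theorem pvEval_flat (ps : List (Int × String)) : ∀ (r : Int) (op : String),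
    ((ps.flatMap (fun p => [PyElem.op p.2, PyElem.num p.1])).foldl pvEvalStep (r, op)).1
      = ps.foldl (fun a p => pvApply a p.1 p.2) r := by
  induction ps with
  | nil => intro r op; rfl
  | cons p ps ih =>
    intro r op
    simp only [List.flatMap_cons, List.cons_append, List.foldl_cons, List.foldl_cons,
      List.nil_append]
    have h1 : pvEvalStep (r, op) (PyElem.op p.2) = (r, p.2) := rfl
    rw [h1]
    have h2 : pvEvalStep (r, p.2) (PyElem.num p.1) = (pvApply r p.1 p.2, p.2) := by
      simp only [pvEvalStep, pvApply]
      by_cases h : p.2 = "+"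
      · simp [h]
      · by_cases h' : p.2 = "*" <;> simp [h, h']
    rw [h2, ih]

theorem pvReach_mem (t : List Int) : ∀ (vals : List Int) (v : Int),
    v ∈ pvReach vals t ↔
      ∃ a ∈ vals, ∃ os ∈ pvProduct pvOperations t.length,
        (t.zip os).foldl (fun acc p => pvApply acc p.1 p.2) a = v := by
  induction t with
  | nil =>
    intro vals v
    simp [pvReach, pvProduct]
  | cons n t ih =>
    intro vals v
    show v ∈ pvReach _ t ↔ _
    rw [ih]
    constructor
    · rintro ⟨a', ha', os, hos, hfold⟩
      rw [PySem.Set.mem_union, PySem.Set.mem_ofList] at ha'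
      rcases ha' with h | h
      · rcases List.mem_map.1 h with ⟨a, ha, rfl⟩
        refine ⟨a, ha, "+" :: os, ?_, ?_⟩
        · simp only [List.length_cons, pvProduct, List.mem_flatMap, List.mem_map]
          exact ⟨"+", by simp [pvOperations], os, hos, rfl⟩
        · simpa [pvApply] using hfold
      · rcases List.mem_map.1 h with ⟨a, ha, rfl⟩
        refine ⟨a, ha, "*" :: os, ?_, ?_⟩
        · simp only [List.length_cons, pvProduct, List.mem_flatMap, List.mem_map]
          exact ⟨"*", by simp [pvOperations], os, hos, rfl⟩
        · simpa [pvApply] using hfold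
    · rintro ⟨a, ha, os, hos, hfold⟩
      simp only [List.length_cons, pvProduct, List.mem_flatMap, List.mem_map] at hos
      rcases hos with ⟨o, ho, os', hos', rfl⟩
      have hmem : pvApply a n o ∈
          PySem.Set.union (PySem.Set.ofList (vals.map (· + n))) (vals.map (· * n)) := by
        rw [PySem.Set.mem_union, PySem.Set.mem_ofList]
        simp only [pvOperations, List.mem_cons] at ho
        rcases ho with rfl | rfl | h
        · exact Or.inl (List.mem_map.2 ⟨a, ha, by simp [pvApply]⟩)
        · exact Or.inr (List.mem_map.2 ⟨a, ha, by simp [pvApply]⟩)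
        · exact absurd h (by simp)
      exact ⟨pvApply a n o, hmem, os', hos', by simpa using hfold⟩

theorem pvInner_eq (target : Int) (fs : List (List PyElem)) : ∀ (s : Int),
    pvInner target s fs =
      if ∃ f ∈ fs, target = (f.foldl pvEvalStep (0, "+")).1 then s + target else s := by
  induction fs with
  | nil => intro s; simp [pvInner]
  | cons f fs ih =>
    intro s
    simp only [pvInner]
    by_cases h : target = (f.foldl pvEvalStep (0, "+")).1
    · simp [h]
    · rw [if_neg h, ih]
      by_cases h' : ∃ g ∈ fs, target = (g.foldl pvEvalStep (0, "+")).1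
      · rw [if_pos h', if_pos (by rcases h' with ⟨g, hg, e⟩; exact ⟨g, List.mem_cons_of_mem _ hg, e⟩)]
      · rw [if_neg h', if_neg (by
          rintro ⟨g, hg, e⟩
          rcases List.mem_cons.1 hg with rfl | hg'
          · exact h e
          · exact h' ⟨g, hg', e⟩)]

theorem pvEq_step (target : Int) (a : Int) (t : List Int) (s : Int) :
    pvInner target s (calculate_combinations (a :: t) pvOperations) =
      if target ∈ pvReach (PySem.Set.ofList [a]) t then s + target else s := by
  rw [pvInner_eq]
  refine if_congr ?_ rfl rfl
  rw [pvReach_mem]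
  have hset : PySem.Set.ofList [a] = ([a] : List Int) := rfl
  rw [hset]
  simp only [calculate_combinations, List.mem_map, List.mem_singleton]
  constructor
  · rintro ⟨f, ⟨os, hos, rfl⟩, e⟩
    refine ⟨a, rfl, os, hos, ?_⟩
    rw [PySem.List.foldl_append_eq_flatMap] at e
    rw [List.cons_append, List.nil_append] at e
    simp only [List.foldl_cons] at e
    have h0 : pvEvalStep (0, "+") (PyElem.num a) = (a, "+") := by
      simp [pvEvalStep]
    rw [h0, pvEval_flat] at e
    exact e.symm
  · rintro ⟨a', ha', os, hos, e⟩
    subst ha'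
    refine ⟨_, ⟨os, hos, rfl⟩, ?_⟩
    rw [PySem.List.foldl_append_eq_flatMap, List.cons_append, List.nil_append]
    simp only [List.foldl_cons]
    have h0 : pvEvalStep (0, "+") (PyElem.num a') = (a', "+") := by
      simp [pvEvalStep]
    rw [h0, pvEval_flat]
    exact e.symm

theorem pvMain (data : List (Int × List Int)) (h : Pre_part1 data) : ∀ (s : Int),
    data.foldl (fun s eq => pvInner eq.1 s (calculate_combinations eq.2 pvOperations)) s =
    data.foldl (fun tot eq =>
      match eq.2 with
      | [] => tot
      | a :: t => if eq.1 ∈ pvReach (PySem.Set.ofList [a]) t then tot + eq.1 else tot) s := by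
  induction data with
  | nil => intro s; rfl
  | cons eq rest ih =>
    intro s
    simp only [List.foldl_cons]
    obtain ⟨tgt, nums⟩ := eq
    have hne : nums ≠ [] := h (tgt, nums) (List.mem_cons_self ..)
    obtain ⟨a, t, rfl⟩ : ∃ a t, nums = a :: t := by
      cases nums with
      | nil => exact absurd rfl hne
      | cons a t => exact ⟨a, t, rfl⟩
    rw [pvEq_step]
    exact ih (fun p hp => h p (List.mem_cons_of_mem _ hp)) _

-- ===== VERDICT (by name: the statement is the Claim_ definition above) =====
theorem part1_spec : Claim_equal_part1 := by
  intro data _ hpre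
  unfold Spec_part1 part1 part1_alt
  exact pvMain data hpre 0
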